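-- pv_equiv track=rewrite | github.com/krzyssikora/advent_of_code | aoc_2016/14_one_time_pad.py | first_three
-- ===== SOURCE A (Python) =====
-- def first_three(string):
--     length = len(string)
--     for ind in range(length - 2):
--         if string[ind] != string[ind + 1]:
--             continue
--         else:
--             if string[ind] != string[ind + 2]:
--                 continue
--             else:
--                 return string[ind]
--     return None
-- ===== SOURCE B (Python) =====
-- def first_three(string):
--     # run-based scan: split into maximal runs of equal chars, return key of first run >= 3
--     i, n = 0, len(string)
--     while i < n:
--         j = i
--         while j < n and string[j] == string[i]:
--             j += 1
--         if j - i >= 3: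
--             return string[i]
--         i = j
--     return None
-- ===== Notes on version B (the rewrite author's own statement) =====
-- stated objective: alternative
-- what changed: Replaces the index-triple check s[i]==s[i+1]==s[i+2] over range(len-2) by a run-decomposition scan: advance over each maximal run of equal characters and return the character of the first run of length >= 3.
import Mathlib
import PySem

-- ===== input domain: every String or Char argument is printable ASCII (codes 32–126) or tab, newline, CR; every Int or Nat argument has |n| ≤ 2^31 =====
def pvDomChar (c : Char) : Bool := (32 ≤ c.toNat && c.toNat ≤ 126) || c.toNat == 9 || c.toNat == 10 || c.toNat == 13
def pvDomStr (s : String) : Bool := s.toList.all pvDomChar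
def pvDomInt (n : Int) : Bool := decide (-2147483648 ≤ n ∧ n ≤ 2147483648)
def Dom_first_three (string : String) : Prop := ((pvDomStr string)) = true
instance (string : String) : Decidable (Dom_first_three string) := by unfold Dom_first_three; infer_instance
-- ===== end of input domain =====

-- B replaces the index-triple check by a run-decomposition scan (alternative shape, same cost).

-- ===== PORT A =====
-- for-loop with early return, transcribed as recursion over the range list;
-- every index the loop reads is in range, so pyGetD with an arbitrary default is exact here
def pvALoop (cs : List Char) : List Int → Option String
  | [] => none
  | ind :: rest =>
    if PySem.List.pyGetD cs ind ' ' ≠ PySem.List.pyGetD cs (ind + 1) ' ' then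
      pvALoop cs rest
    else if PySem.List.pyGetD cs ind ' ' ≠ PySem.List.pyGetD cs (ind + 2) ' ' then
      pvALoop cs rest
    else
      some (String.mk [PySem.List.pyGetD cs ind ' '])

def first_three (string : String) : Option String :=
  let cs := string.toList
  let length : Int := cs.length
  pvALoop cs (PySem.List.pyRange 0 (length - 2) 1)

-- ===== PORT B =====
-- outer while over runs: the inner while computes the run length (takeWhile),
-- and i = j advances to the rest of the string after the run (dropWhile)
def pvBLoop : List Char → Option String
  | [] => none
  | c :: rest =>
    if (rest.takeWhile (· == c)).length + 1 ≥ 3 then some (String.mk [c])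
    else pvBLoop (rest.dropWhile (· == c))
termination_by cs => cs.length
decreasing_by
  have := List.length_dropWhile_le (p := (· == c)) (l := rest)
  simp; omega

def first_three_alt (string : String) : Option String :=
  pvBLoop string.toList

-- ===== PRECONDITION & SPEC =====
def Spec_first_three (string : String) (out : Option String) : Prop := out = first_three_alt string
instance (string : String) (out : Option String) : Decidable (Spec_first_three string out) := by unfold Spec_first_three; infer_instance

-- ===== CLAIM (what is proved, stated in full; the proofs are below) =====
def Claim_equal_first_three : Prop := ∀ (string : String), Dom_first_three string → Spec_first_three string (first_three string)

-- ===== LEMMAS AND PROOFS =====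

-- common reference: scan for the first a=b=c triple
def pvTri : List Char → Option String
  | a :: b :: c :: rest =>
    if a = b then (if a = c then some (String.mk [a]) else pvTri (b :: c :: rest))
    else pvTri (b :: c :: rest)
  | _ => none

theorem pvTri_short (xs : List Char) (h : xs.length ≤ 2) : pvTri xs = none := by
  match xs, h with
  | [], _ => rfl
  | [a], _ => rfl
  | [a, b], _ => rfl

theorem pvTri_cons_ne (a b : Char) (t : List Char) (h : a ≠ b) :
    pvTri (a :: b :: t) = pvTri (b :: t) := by
  cases t with
  | nil => simp [pvTri]
  | cons c t' => simp [pvTri, h]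

theorem pvTri_run2_ne (a c : Char) (t : List Char) (h : a ≠ c) :
    pvTri (a :: a :: c :: t) = pvTri (c :: t) := by
  rw [show pvTri (a :: a :: c :: t) = pvTri (a :: c :: t) by simp [pvTri, h],
      pvTri_cons_ne a c t h]

theorem pvA_eq_tri (cs : List Char) (i : Nat) :
    pvALoop cs (PySem.List.pyRange (i : Int) ((cs.length : Int) - 2) 1) = pvTri (cs.drop i) := by
  by_cases hlt : (i : Int) < (cs.length : Int) - 2
  · have hi2 : i + 2 < cs.length := by omega
    have hi0 : i < cs.length := by omega
    have hi1 : i + 1 < cs.length := by omega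
    rw [PySem.List.pyRange_one_cons hlt]
    have hd0 : cs.drop i = cs[i] :: cs.drop (i + 1) := List.drop_eq_getElem_cons hi0
    have hd1 : cs.drop (i + 1) = cs[i + 1] :: cs.drop (i + 2) := List.drop_eq_getElem_cons hi1
    have hd2 : cs.drop (i + 2) = cs[i + 2] :: cs.drop (i + 3) := List.drop_eq_getElem_cons hi2
    have g0 : PySem.List.pyGetD cs (i : Int) ' ' = cs[i] := PySem.List.pyGetD_ofNat cs i ' ' hi0
    have g1 : PySem.List.pyGetD cs ((i : Int) + 1) ' ' = cs[i + 1] := by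
      rw [show ((i : Int) + 1) = ((i + 1 : Nat) : Int) by push_cast; ring]
      exact PySem.List.pyGetD_ofNat cs (i+1) ' ' hi1
    have g2 : PySem.List.pyGetD cs ((i : Int) + 2) ' ' = cs[i + 2] := by
      rw [show ((i : Int) + 2) = ((i + 2 : Nat) : Int) by push_cast; ring]
      exact PySem.List.pyGetD_ofNat cs (i+2) ' ' hi2
    have ih := pvA_eq_tri cs (i + 1)
    rw [hd0, hd1, hd2]
    push_cast at ih
    simp only [pvALoop, g0, g1, g2, ih, hd1, hd2, pvTri]
    by_cases h01 : cs[i] = cs[i + 1] <;> by_cases h02 : cs[i] = cs[i + 2] <;>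
      simp [h01, h02]
  · rw [PySem.List.pyRange_one_eq_nil (by omega)]
    have : (cs.drop i).length ≤ 2 := by
      simp only [List.length_drop]; omega
    rw [pvTri_short _ this]; rfl
termination_by cs.length - i
decreasing_by omega

theorem pvB_eq_tri (cs : List Char) : pvBLoop cs = pvTri cs := by
  induction cs using pvBLoop.induct with
  | case1 => simp [pvBLoop, pvTri]
  | case2 c rest hk =>
    rcases rest with _ | ⟨x, _ | ⟨y, t⟩⟩
    · simp at hk
    · by_cases hx : x = c <;> simp [hx] at hk
    · by_cases hx : x = c
      · subst hx
        by_cases hy : y = x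
        · subst hy
          simp only [pvBLoop, if_pos hk]
          simp [pvTri]
        · exfalso; simp [hy] at hk
      · exfalso; simp [hx] at hk
  | case3 c rest hk ih =>
    simp only [pvBLoop]
    rw [if_neg hk, ih]
    rcases rest with _ | ⟨d, t⟩
    · simp [pvTri, List.dropWhile]
    · by_cases hd : d = c
      · subst hd
        rcases t with _ | ⟨e, t'⟩
        · simp [pvTri, pvTri_short]
        · by_cases he : e = d
          · exfalso; simp [he] at hk
          · simp only [List.dropWhile_cons, BEq.rfl, if_true, beq_iff_eq, he, if_false]
            exact (pvTri_run2_ne d e t' (Ne.symm he)).symm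
      · simp only [List.dropWhile_cons, beq_iff_eq, hd, if_false]
        exact (pvTri_cons_ne c d t (Ne.symm hd)).symm

-- ===== VERDICT (by name: the statement is the Claim_ definition above) =====
theorem first_three_spec : Claim_equal_first_three := by
  intro s _
  unfold Spec_first_three first_three first_three_alt
  simpa [pvB_eq_tri] using pvA_eq_tri s.toList 0
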